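-- pv_equiv track=rewrite | github.com/Reza-B/TLA_project | phase2/module2.py | get_bit_address
-- ===== SOURCE A (Python) =====
-- def get_bit_address(row: int, col: int, size: int) -> str:
--     address = []
--     while size > 1:
--         half = size // 2
--         if row < half:
--             if col < half:
--                 address.append('0')
--             else:
--                 address.append('1')
--                 col -= half
--         else:
--             if col < half:
--                 address.append('2')
--             else:
--                 address.append('3')
--                 col -= half
--             row -= half
--         size = half
--     return ''.join(address)
-- ===== SOURCE B (Python) =====
-- def get_bit_address(row: int, col: int, size: int) -> str:
--     if size <= 1:
--         return ''
--     half = size // 2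
--     if row < half:
--         if col < half:
--             return '0' + get_bit_address(row, col, half)
--         return '1' + get_bit_address(row, col - half, half)
--     if col < half:
--         return '2' + get_bit_address(row - half, col, half)
--     return '3' + get_bit_address(row - half, col - half, half)
-- ===== Notes on version B (the rewrite author's own statement) =====
-- stated objective: alternative
-- what changed: Replaced the iterative while-loop with an explicit accumulator list and a final join by a direct quadtree recursive descent that builds the address string front-to-back by string concatenation.
import Mathlib
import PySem

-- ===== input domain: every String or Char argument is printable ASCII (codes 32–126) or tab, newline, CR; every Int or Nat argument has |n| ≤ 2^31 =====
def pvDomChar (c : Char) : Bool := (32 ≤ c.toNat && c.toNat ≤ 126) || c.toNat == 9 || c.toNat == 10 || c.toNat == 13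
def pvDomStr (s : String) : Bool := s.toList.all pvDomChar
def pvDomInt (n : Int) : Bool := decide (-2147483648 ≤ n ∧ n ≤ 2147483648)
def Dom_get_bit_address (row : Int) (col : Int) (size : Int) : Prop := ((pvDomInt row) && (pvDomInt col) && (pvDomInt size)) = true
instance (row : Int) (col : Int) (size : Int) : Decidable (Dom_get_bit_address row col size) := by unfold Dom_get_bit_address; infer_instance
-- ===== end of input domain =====

-- B replaces A's while-loop with accumulator list + join by a direct quadtree
-- recursive descent building the string front-to-back (objective: alternative).


-- termination helper used by both ports
theorem pv_half_lt {size : Int} (h : 1 < size) : (PySem.Int.floordiv size 2).toNat < size.toNat := by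
  rw [PySem.Int.floordiv_eq_ediv_of_pos (by omega)]; omega

-- ===== PORT A =====
-- the while-loop, with the Python accumulator list `address`
def get_bit_address_loop (row : Int) (col : Int) (size : Int) (address : List String) : List String :=
  if h : size > 1 then
    let half := PySem.Int.floordiv size 2
    if row < half then
      if col < half then
        get_bit_address_loop row col half (address ++ ["0"])
      else
        get_bit_address_loop row (col - half) half (address ++ ["1"])
    else
      if col < half then
        get_bit_address_loop (row - half) col half (address ++ ["2"])
      else
        get_bit_address_loop (row - half) (col - half) half (address ++ ["3"])
  else address
termination_by size.toNat
decreasing_by all_goals exact pv_half_lt h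

def get_bit_address (row : Int) (col : Int) (size : Int) : String :=
  String.join (get_bit_address_loop row col size [])

-- ===== PORT B =====
def get_bit_address_alt (row : Int) (col : Int) (size : Int) : String :=
  if h : size ≤ 1 then ""
  else
    let half := PySem.Int.floordiv size 2
    if row < half then
      if col < half then "0" ++ get_bit_address_alt row col half
      else "1" ++ get_bit_address_alt row (col - half) half
    else
      if col < half then "2" ++ get_bit_address_alt (row - half) col half
      else "3" ++ get_bit_address_alt (row - half) (col - half) half
termination_by size.toNat
decreasing_by all_goals exact pv_half_lt (by omega)

-- ===== PRECONDITION & SPEC =====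
def Spec_get_bit_address (row : Int) (col : Int) (size : Int) (out : String) : Prop := out = get_bit_address_alt row col size
instance (row : Int) (col : Int) (size : Int) (out : String) : Decidable (Spec_get_bit_address row col size out) := by unfold Spec_get_bit_address; infer_instance

-- ===== CLAIM (what is proved, stated in full; the proofs are below) =====
def Claim_equal_get_bit_address : Prop := ∀ (row : Int) (col : Int) (size : Int), Dom_get_bit_address row col size → Spec_get_bit_address row col size (get_bit_address row col size)

-- ===== LEMMAS AND PROOFS =====

theorem join_append_singleton (xs : List String) (s : String) :
    String.join (xs ++ [s]) = String.join xs ++ s := by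
  simp [String.join]

theorem loop_eq_alt (row col size : Int) (acc : List String) :
    String.join (get_bit_address_loop row col size acc)
      = String.join acc ++ get_bit_address_alt row col size := by
  fun_induction get_bit_address_loop row col size acc with
  | case1 row col size acc h half h1 h2 ih =>
    rw [get_bit_address_alt]
    simp only [ih, join_append_singleton]
    have hf : PySem.Int.floordiv size 2 = size / 2 := PySem.Int.floordiv_eq_ediv_of_pos (by omega)
    simp only [half, hf] at h1 h2 ⊢
    simp [show ¬ size ≤ 1 by omega, h1, h2, String.append_assoc]
  | case2 row col size acc h half h1 h2 ih =>
    rw [get_bit_address_alt]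
    simp only [ih, join_append_singleton]
    have hf : PySem.Int.floordiv size 2 = size / 2 := PySem.Int.floordiv_eq_ediv_of_pos (by omega)
    simp only [half, hf] at h1 h2 ⊢
    simp [show ¬ size ≤ 1 by omega, h1, h2, String.append_assoc]
  | case3 row col size acc h half h1 h2 ih =>
    rw [get_bit_address_alt]
    simp only [ih, join_append_singleton]
    have hf : PySem.Int.floordiv size 2 = size / 2 := PySem.Int.floordiv_eq_ediv_of_pos (by omega)
    simp only [half, hf] at h1 h2 ⊢
    simp [show ¬ size ≤ 1 by omega, h1, h2, String.append_assoc]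
  | case4 row col size acc h half h1 h2 ih =>
    rw [get_bit_address_alt]
    simp only [ih, join_append_singleton]
    have hf : PySem.Int.floordiv size 2 = size / 2 := PySem.Int.floordiv_eq_ediv_of_pos (by omega)
    simp only [half, hf] at h1 h2 ⊢
    simp [show ¬ size ≤ 1 by omega, h1, h2, String.append_assoc]
  | case5 row col size acc h =>
    rw [get_bit_address_alt]
    simp [show size ≤ 1 by omega]

-- ===== VERDICT (by name: the statement is the Claim_ definition above) =====
theorem get_bit_address_spec : Claim_equal_get_bit_address := by
  intro row col size _
  unfold Spec_get_bit_address get_bit_address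
  simpa using loop_eq_alt row col size []
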